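-- pv_equiv track=rewrite | github.com/odinhg/nrk-former-sp-mcts | board.py | get_blobs
-- ===== SOURCE A (Python) =====
-- EMPTY = " "
--
-- def is_within_bounds(board, x, y):
--     return 0 <= y < len(board) and 0 <= x < len(board[0])
--
-- def dfs(board, x, y, target_color):
--     # Depth-first search to find connected blocks of the same color
--     if not is_within_bounds(board, x, y) or board[y][x] != target_color:
--         return []
--     board[y][x] = EMPTY
--     return [(x, y)] + dfs(board, x + 1, y, target_color) + dfs(board, x - 1, y, target_color) + dfs(board, x, y + 1, target_color) + dfs(board, x, y - 1, target_color)
--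
-- def get_connected_blocks(board, x, y):
--     # Return a list of connected blocks starting from (x, y)
--     target_color = board[y][x]
--     return dfs(board, x, y, target_color)
--
-- def get_blobs(board):
--     # Return a list of coordinates for each blob
--     blobs = []
--     visited = set()
--     board_copy = copy_board(board)
--     for y in range(len(board)):
--         for x in range(len(board[0])):
--             if (x, y) in visited or board_copy[y][x] == EMPTY:
--                 continue
--             blob = get_connected_blocks(board_copy, x, y)
--             visited.update(blob)
--             x, y = blob[0]
--             blobs.append((x, y))
--     return blobs
--
-- def copy_board(board):
--     # Return a deep copy of the board (faster than deepcopy)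
--     return [row[:] for row in board]
-- ===== SOURCE B (Python) =====
-- EMPTY = " "
--
-- def get_blobs(board):
--     # Iterative flood fill with an explicit stack; the board copy's EMPTY marks
--     # double as the visited set, so no separate visited structure is needed.
--     blobs = []
--     board_copy = [row[:] for row in board]
--     for y in range(len(board)):
--         for x in range(len(board[0])):
--             color = board_copy[y][x]
--             if color == EMPTY:
--                 continue
--             blobs.append((x, y))
--             stack = [(x, y)]
--             while stack:
--                 cx, cy = stack.pop()
--                 if not (0 <= cy < len(board_copy) and 0 <= cx < len(board_copy[0])) or board_copy[cy][cx] != color: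
--                     continue
--                 board_copy[cy][cx] = EMPTY
--                 stack.extend(((cx, cy - 1), (cx, cy + 1), (cx - 1, cy), (cx + 1, cy)))
--     return blobs
-- ===== Notes on version B (the rewrite author's own statement) =====
-- stated objective: alternative
-- what changed: A's recursive four-way DFS plus a separate visited set is replaced by an explicit-stack iterative flood fill whose EMPTY marks on the board copy double as the visited structure, so the visited set and the recursion disappear.
import Mathlib
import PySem

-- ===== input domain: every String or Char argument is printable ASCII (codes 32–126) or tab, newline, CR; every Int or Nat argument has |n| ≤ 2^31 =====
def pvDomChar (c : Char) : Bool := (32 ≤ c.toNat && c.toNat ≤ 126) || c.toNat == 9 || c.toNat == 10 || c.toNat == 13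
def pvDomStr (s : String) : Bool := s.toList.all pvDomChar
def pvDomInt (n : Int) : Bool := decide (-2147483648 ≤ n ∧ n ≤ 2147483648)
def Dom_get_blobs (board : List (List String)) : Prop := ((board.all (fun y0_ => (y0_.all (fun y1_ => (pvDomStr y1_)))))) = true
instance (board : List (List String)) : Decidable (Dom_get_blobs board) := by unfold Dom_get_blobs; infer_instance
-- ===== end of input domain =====

-- B replaces A's recursive DFS (plus a redundant visited set) by an explicit-stack
-- flood fill whose EMPTY marks double as the visited structure; return value only —
-- neither program mutates its argument (both work on a row-sliced copy).

-- ===== PORT A =====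

def pvEmpty : String := " "

-- EMPTY default in the cell read is unreachable: reads happen under the bounds guard (and Pre_).
def pvGetCell (b : List (List String)) (x y : Int) : String :=
  PySem.List.pyGetD (PySem.List.pyGetD b y []) x pvEmpty

-- board[y][x] = EMPTY; exact under the 0 ≤ x, 0 ≤ y bounds guard in force at every call.
def pvSetCell (b : List (List String)) (x y : Int) (v : String) : List (List String) :=
  b.set y.toNat ((PySem.List.pyGetD b y []).set x.toNat v)

def is_within_bounds (b : List (List String)) (x y : Int) : Bool :=
  (decide (0 ≤ y) && decide (y < (b.length : Int))) &&
  (decide (0 ≤ x) && decide (x < ((b.headD []).length : Int)))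

-- A's recursive dfs; the Nat argument is fuel, a totality device only: callers pass
-- fuel exceeding the number of target-colored cells, so it is never exhausted.
def dfsF : Nat → List (List String) → Int → Int → String →
    List (List String) × List (Int × Int)
  | 0, b, _, _, _ => (b, [])
  | n + 1, b, x, y, t =>
    if ¬ is_within_bounds b x y = true ∨ pvGetCell b x y ≠ t then (b, [])
    else
      let b0 := pvSetCell b x y pvEmpty
      let r1 := dfsF n b0 (x + 1) y t
      let r2 := dfsF n r1.1 (x - 1) y t
      let r3 := dfsF n r2.1 x (y + 1) t
      let r4 := dfsF n r3.1 x (y - 1) t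
      (r4.1, (x, y) :: (r1.2 ++ r2.2 ++ r3.2 ++ r4.2))

def get_connected_blocks (b : List (List String)) (x y : Int) :
    List (List String) × List (Int × Int) :=
  dfsF (b.flatten.length + 1) b x y (pvGetCell b x y)

-- one inner-loop body of A's scan: state = (blobs, visited, board_copy)
def pvCellA (st : List (Int × Int) × PySem.Set (Int × Int) × List (List String))
    (x y : Int) : List (Int × Int) × PySem.Set (Int × Int) × List (List String) :=
  match st with
  | (blobs, visited, b) =>
    if (x, y) ∈ visited ∨ pvGetCell b x y = pvEmpty then (blobs, visited, b)
    else
      let blob := get_connected_blocks b x y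
      let visited' := PySem.Set.update visited blob.2
      let p := blob.2.headD (0, 0)   -- blob[0]; blob is nonempty here (the dfs guard holds)
      (blobs ++ [(p.1, p.2)], visited', blob.1)

def get_blobs (board : List (List String)) : List (Int × Int) :=
  ((PySem.List.pyRange 0 (board.length : Int)).foldl
    (fun st y =>
      (PySem.List.pyRange 0 (((board.headD []).length : Int))).foldl
        (fun st x => pvCellA st x y) st)
    ([], PySem.Set.empty, board.map (fun row => PySem.List.slice row none none))).1

-- ===== PORT B =====

-- B's while-stack flood fill; head of the Lean list = end of the Python list (the
-- stack top), so pop = head and the extend's four pushes prepend in reverse.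
-- The Nat argument is fuel, a totality device only: the caller's fuel bounds the
-- number of loop iterations, so it is never exhausted.
def stackFillF : Nat → List (List String) → List (Int × Int) → String →
    List (List String)
  | 0, b, _, _ => b
  | _ + 1, b, [], _ => b
  | n + 1, b, (x, y) :: s, color =>
    if ¬ is_within_bounds b x y = true ∨ pvGetCell b x y ≠ color then
      stackFillF n b s color
    else
      stackFillF n (pvSetCell b x y pvEmpty)
        ((x + 1, y) :: (x - 1, y) :: (x, y + 1) :: (x, y - 1) :: s) color

-- one inner-loop body of B's scan: state = (blobs, board_copy)
def pvCellB (st : List (Int × Int) × List (List String)) (x y : Int) :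
    List (Int × Int) × List (List String) :=
  let color := pvGetCell st.2 x y
  if color = pvEmpty then st
  else (st.1 ++ [(x, y)], stackFillF (4 * st.2.flatten.length + 2) st.2 [(x, y)] color)

def get_blobs_alt (board : List (List String)) : List (Int × Int) :=
  ((PySem.List.pyRange 0 (board.length : Int)).foldl
    (fun st y =>
      (PySem.List.pyRange 0 (((board.headD []).length : Int))).foldl
        (fun st x => pvCellB st x y) st)
    ([], board.map (fun row => PySem.List.slice row none none))).1

-- ===== PRECONDITION & SPEC =====

-- Pre_ excludes ragged boards having some row shorter than row 0: there the Python A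
-- (and B) hits board_copy[y][x] with x >= len(board[y]) and raises IndexError.
def Pre_get_blobs (board : List (List String)) : Prop :=
  ∀ row ∈ board, (board.headD []).length ≤ row.length
instance (board : List (List String)) : Decidable (Pre_get_blobs board) := by
  unfold Pre_get_blobs; infer_instance

def pvWitness_get_blobs : List (List String) := [["a", "a", " "], ["b", "a", "b"]]

def Spec_get_blobs (board : List (List String)) (out : List (Int × Int)) : Prop := out = get_blobs_alt board
instance (board : List (List String)) (out : List (Int × Int)) : Decidable (Spec_get_blobs board out) := by unfold Spec_get_blobs; infer_instance

-- ===== CLAIM (what is proved, stated in full; the proofs are below) =====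
def Claim_equal_get_blobs : Prop := ∀ (board : List (List String)), Dom_get_blobs board → Pre_get_blobs board → Spec_get_blobs board (get_blobs board)

-- ===== LEMMAS AND PROOFS =====

-- number of cells holding color t; the termination measure of both flood fills
def pvCount (b : List (List String)) (t : String) : Nat :=
  (b.map (fun r => r.count t)).sum

def pvShape (b : List (List String)) : List Nat := b.map List.length

lemma bounds_iff (b : List (List String)) (x y : Int) :
    is_within_bounds b x y = true ↔
      0 ≤ y ∧ y < (b.length : Int) ∧ 0 ≤ x ∧ x < ((b.headD []).length : Int) := by
  simp [is_within_bounds, Bool.and_eq_true, decide_eq_true_eq]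
  tauto

lemma pyGetD_oob {α : Type} (xs : List α) (i : Int) (d : α) (h0 : 0 ≤ i)
    (h1 : (xs.length : Int) ≤ i) : PySem.List.pyGetD xs i d = d := by
  have h : PySem.List.pyIdx? xs.length i = none := by
    unfold PySem.List.pyIdx?
    split_ifs <;> first | rfl | omega
  simp [PySem.List.pyGetD, PySem.List.pyGet?, h]


lemma pyIdx?_pos (n : Nat) (q : Int) (h0 : 0 ≤ q) (h1 : q < (n : Int)) :
    PySem.List.pyIdx? n q = some q.toNat := by
  unfold PySem.List.pyIdx?
  split_ifs <;> first | rfl | omega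

lemma pyIdx?_lt {n : Nat} {q : Int} {k : Nat} (h : PySem.List.pyIdx? n q = some k) :
    k < n := by
  unfold PySem.List.pyIdx? at h
  split_ifs at h <;> simp_all <;> omega

lemma pyGetD_nonneg {α : Type} (l : List α) (q : Int) (d : α) (h0 : 0 ≤ q) :
    PySem.List.pyGetD l q d = if h : q.toNat < l.length then l[q.toNat] else d := by
  split_ifs with h
  · exact PySem.List.pyGetD_eq_getElem l d h0 (by omega)
  · exact pyGetD_oob l q d h0 (by omega)

lemma pyGetD_set {α : Type} (l : List α) (i : Nat) (a : α) (q : Int) (d : α) :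
    PySem.List.pyGetD (l.set i a) q d =
      if PySem.List.pyIdx? l.length q = some i ∧ i < l.length then a
      else PySem.List.pyGetD l q d := by
  simp only [PySem.List.pyGetD, PySem.List.pyGet?, List.length_set]
  cases h : PySem.List.pyIdx? l.length q with
  | none => simp [h]
  | some k =>
    have hk : k < l.length := pyIdx?_lt h
    simp only [h, Option.bind_some, List.getElem?_set]
    by_cases hik : i = k
    · subst hik
      simp [hk]
    · simp [hik, Ne.symm hik]

lemma getCell_set (b : List (List String)) (x y : Int) (v : String) (p q : Int)
    (hx : 0 ≤ x) (hy : 0 ≤ y) :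
    pvGetCell (pvSetCell b x y v) p q = pvGetCell b p q ∨
      pvGetCell (pvSetCell b x y v) p q = v := by
  unfold pvGetCell pvSetCell
  rw [pyGetD_set]
  split_ifs with h
  · -- q addresses the modified row
    obtain ⟨hq, hjlen⟩ := h
    have hrow : PySem.List.pyGetD b y ([] : List String) = b[y.toNat] := by
      rw [pyGetD_nonneg _ _ _ hy]
      simp [hjlen]
    have hbq : PySem.List.pyGetD b q ([] : List String) = b[y.toNat] := by
      simp only [PySem.List.pyGetD, PySem.List.pyGet?, hq, Option.bind_some]
      simp [List.getElem?_eq_getElem hjlen]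
    rw [hrow, hbq, pyGetD_set]
    split_ifs with h2
    · exact Or.inr rfl
    · exact Or.inl rfl
  · exact Or.inl rfl

lemma getCell_set_self (b : List (List String)) (x y : Int)
    (hx : 0 ≤ x) (hy : 0 ≤ y) (hylen : y < (b.length : Int)) :
    pvGetCell (pvSetCell b x y pvEmpty) x y = pvEmpty := by
  have hjlen : y.toNat < b.length := by omega
  have hq : PySem.List.pyIdx? b.length y = some y.toNat :=
    pyIdx?_pos _ _ hy hylen
  unfold pvGetCell pvSetCell
  rw [pyGetD_set]
  rw [if_pos ⟨hq, hjlen⟩]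
  rw [pyGetD_set]
  split_ifs with h2
  · rfl
  · -- x lands outside the (unchanged-length) row: the default is EMPTY as well
    have hrow : PySem.List.pyGetD b y ([] : List String) = b[y.toNat] := by
      rw [pyGetD_nonneg _ _ _ hy]
      simp [hjlen]
    rw [hrow] at h2 ⊢
    rw [pyGetD_nonneg _ _ _ hx]
    split_ifs with h3
    · exfalso
      exact h2 ⟨pyIdx?_pos _ _ hx (by omega), h3⟩
    · rfl

lemma count_set_le (r : List String) (i : Nat) (v t : String) (hv : v ≠ t) :
    (r.set i v).count t ≤ r.count t := by
  induction r generalizing i with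
  | nil => simp
  | cons a r ih =>
    cases i with
    | zero =>
      simp only [List.set_cons_zero, List.count_cons, beq_iff_eq]
      have := ih 0
      split_ifs <;> simp_all <;> omega
    | succ j =>
      simp only [List.set_cons_succ, List.count_cons]
      have := ih j
      split_ifs <;> omega

lemma count_set_lt (r : List String) (i : Nat) (v t : String) (hv : v ≠ t)
    (h : r[i]? = some t) : (r.set i v).count t < r.count t := by
  induction r generalizing i with
  | nil => simp at h
  | cons a r ih =>
    cases i with
    | zero =>
      simp only [List.getElem?_cons_zero, Option.some.injEq] at h
      subst h
      simp only [List.set_cons_zero, List.count_cons, beq_iff_eq]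
      split_ifs <;> simp_all <;> omega
    | succ j =>
      simp only [List.getElem?_cons_succ] at h
      simp only [List.set_cons_succ, List.count_cons]
      have := ih j h
      split_ifs <;> omega

lemma pvCount_set_le' (b : List (List String)) (j : Nat) (r' : List String) (t : String)
    (h : r'.count t ≤ (b.getD j []).count t) :
    pvCount (b.set j r') t ≤ pvCount b t := by
  induction b generalizing j with
  | nil => simp [pvCount]
  | cons a b ih =>
    cases j with
    | zero => simp_all [pvCount]
    | succ j =>
      simp only [List.set_cons_succ, pvCount, List.map_cons, List.sum_cons]
      exact Nat.add_le_add_left (ih j (by simpa using h)) _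

lemma pvCount_set_lt' (b : List (List String)) (j : Nat) (r' : List String) (t : String)
    (hj : j < b.length) (h : r'.count t < (b.getD j []).count t) :
    pvCount (b.set j r') t < pvCount b t := by
  induction b generalizing j with
  | nil => simp at hj
  | cons a b ih =>
    cases j with
    | zero => simp_all [pvCount]
    | succ j =>
      simp only [List.set_cons_succ, pvCount, List.map_cons, List.sum_cons]
      exact Nat.add_lt_add_left (ih j (by simpa using hj) (by simpa using h)) _

lemma pvCount_setCell_le (b : List (List String)) (x y : Int) (t : String)
    (hy : 0 ≤ y) (ht : t ≠ pvEmpty) :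
    pvCount (pvSetCell b x y pvEmpty) t ≤ pvCount b t := by
  unfold pvSetCell
  by_cases hj : y.toNat < b.length
  · apply pvCount_set_le'
    have hrow : PySem.List.pyGetD b y ([] : List String) = b[y.toNat] := by
      rw [pyGetD_nonneg _ _ _ hy]; simp [hj]
    rw [hrow]
    have : b.getD y.toNat [] = b[y.toNat] := List.getD_eq_getElem b [] hj
    rw [this]
    exact count_set_le _ _ _ _ (Ne.symm ht)
  · rw [List.set_eq_of_length_le (by omega)]

lemma pvCount_setCell_lt (b : List (List String)) (x y : Int) (t : String)
    (hx : 0 ≤ x) (hy : 0 ≤ y) (hylen : y < (b.length : Int))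
    (hcell : pvGetCell b x y = t) (ht : t ≠ pvEmpty) :
    pvCount (pvSetCell b x y pvEmpty) t < pvCount b t := by
  have hj : y.toNat < b.length := by omega
  have hrow : PySem.List.pyGetD b y ([] : List String) = b[y.toNat] := by
    rw [pyGetD_nonneg _ _ _ hy]; simp [hj]
  unfold pvGetCell at hcell
  rw [hrow] at hcell
  rw [pyGetD_nonneg _ _ _ hx] at hcell
  have hxlen : x.toNat < b[y.toNat].length := by
    by_contra hc
    rw [dif_neg hc] at hcell
    exact ht hcell.symm
  rw [dif_pos hxlen] at hcell
  unfold pvSetCell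
  apply pvCount_set_lt' _ _ _ _ hj
  rw [hrow, List.getD_eq_getElem b [] hj]
  exact count_set_lt _ _ _ _ (Ne.symm ht) (by rw [List.getElem?_eq_getElem hxlen, hcell])

lemma pyGetD_getD {α : Type} (l : List α) (q : Int) (d : α) (h0 : 0 ≤ q) :
    PySem.List.pyGetD l q d = l.getD q.toNat d := by
  rw [pyGetD_nonneg _ _ _ h0]
  split_ifs with h
  · exact (List.getD_eq_getElem l d h).symm
  · rw [List.getD_eq_default _ _ (by omega)]

lemma shape_set' (b : List (List String)) (j : Nat) (r' : List String)
    (h : r'.length = (b.getD j []).length) : pvShape (b.set j r') = pvShape b := by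
  induction b generalizing j with
  | nil => rfl
  | cons a b ih =>
    cases j with
    | zero => simp_all [pvShape]
    | succ j =>
      have hrec := ih j (by simpa using h)
      simp only [pvShape] at hrec
      simp [List.set_cons_succ, pvShape, hrec]

lemma shape_setCell (b : List (List String)) (x y : Int) (v : String) (hy : 0 ≤ y) :
    pvShape (pvSetCell b x y v) = pvShape b := by
  unfold pvSetCell
  apply shape_set'
  rw [List.length_set, pyGetD_getD b y [] hy]

lemma pvCount_le_flatten (b : List (List String)) (t : String) :
    pvCount b t ≤ b.flatten.length := by
  rw [List.length_flatten, pvCount]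
  exact List.sum_le_sum (fun r _ => List.count_le_length)


lemma dfsF_succ_false (n : Nat) (b : List (List String)) (x y : Int) (t : String)
    (hG : ¬ is_within_bounds b x y = true ∨ pvGetCell b x y ≠ t) :
    dfsF (n + 1) b x y t = (b, []) := by
  simp only [dfsF]; rw [if_pos hG]

lemma dfsF_succ_true (n : Nat) (b : List (List String)) (x y : Int) (t : String)
    (hG : ¬ (¬ is_within_bounds b x y = true ∨ pvGetCell b x y ≠ t)) :
    dfsF (n + 1) b x y t =
      ((dfsF n (dfsF n (dfsF n (dfsF n (pvSetCell b x y pvEmpty) (x + 1) y t).1 (x - 1) y t).1 x (y + 1) t).1 x (y - 1) t).1,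
       (x, y) :: ((dfsF n (pvSetCell b x y pvEmpty) (x + 1) y t).2 ++
         (dfsF n (dfsF n (pvSetCell b x y pvEmpty) (x + 1) y t).1 (x - 1) y t).2 ++
         (dfsF n (dfsF n (dfsF n (pvSetCell b x y pvEmpty) (x + 1) y t).1 (x - 1) y t).1 x (y + 1) t).2 ++
         (dfsF n (dfsF n (dfsF n (dfsF n (pvSetCell b x y pvEmpty) (x + 1) y t).1 (x - 1) y t).1 x (y + 1) t).1 x (y - 1) t).2)) := by
  simp only [dfsF]; rw [if_neg hG]

lemma stackF_nil (n : Nat) (b : List (List String)) (t : String) :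
    stackFillF (n + 1) b [] t = b := rfl

lemma stackF_cons_true (n : Nat) (b : List (List String)) (x y : Int)
    (s : List (Int × Int)) (t : String)
    (hG : ¬ is_within_bounds b x y = true ∨ pvGetCell b x y ≠ t) :
    stackFillF (n + 1) b ((x, y) :: s) t = stackFillF n b s t := by
  simp only [stackFillF]; rw [if_pos hG]

lemma stackF_cons_false (n : Nat) (b : List (List String)) (x y : Int)
    (s : List (Int × Int)) (t : String)
    (hG : ¬ (¬ is_within_bounds b x y = true ∨ pvGetCell b x y ≠ t)) :
    stackFillF (n + 1) b ((x, y) :: s) t =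
      stackFillF n (pvSetCell b x y pvEmpty)
        ((x + 1, y) :: (x - 1, y) :: (x, y + 1) :: (x, y - 1) :: s) t := by
  simp only [stackFillF]; rw [if_neg hG]

lemma guard_parts {b : List (List String)} {x y : Int} {t : String}
    (hG : ¬ (¬ is_within_bounds b x y = true ∨ pvGetCell b x y ≠ t)) :
    (0 ≤ y ∧ y < (b.length : Int) ∧ 0 ≤ x ∧ x < ((b.headD []).length : Int)) ∧
      pvGetCell b x y = t := by
  push_neg at hG
  exact ⟨(bounds_iff b x y).mp hG.1, hG.2⟩

-- dfs facts (all by induction on fuel)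
lemma dfs_shape (n : Nat) : ∀ (b : List (List String)) (x y : Int) (t : String),
    pvShape (dfsF n b x y t).1 = pvShape b := by
  induction n with
  | zero => intro b x y t; rfl
  | succ n ih =>
    intro b x y t
    by_cases hG : ¬ is_within_bounds b x y = true ∨ pvGetCell b x y ≠ t
    · rw [dfsF_succ_false _ _ _ _ _ hG]
    · rw [dfsF_succ_true _ _ _ _ _ hG]
      obtain ⟨⟨hy0, _, _, _⟩, _⟩ := guard_parts hG
      simp only
      rw [ih, ih, ih, ih, shape_setCell _ _ _ _ hy0]

lemma dfs_count_le (n : Nat) : ∀ (b : List (List String)) (x y : Int) (t : String),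
    t ≠ pvEmpty → pvCount (dfsF n b x y t).1 t ≤ pvCount b t := by
  induction n with
  | zero => intro b x y t _; exact le_rfl
  | succ n ih =>
    intro b x y t ht
    by_cases hG : ¬ is_within_bounds b x y = true ∨ pvGetCell b x y ≠ t
    · rw [dfsF_succ_false _ _ _ _ _ hG]
    · rw [dfsF_succ_true _ _ _ _ _ hG]
      obtain ⟨⟨hy0, _, _, _⟩, _⟩ := guard_parts hG
      simp only
      exact (ih _ _ _ _ ht).trans ((ih _ _ _ _ ht).trans ((ih _ _ _ _ ht).trans
        ((ih _ _ _ _ ht).trans (pvCount_setCell_le _ _ _ _ hy0 ht))))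

lemma dfs_preserves_empty (n : Nat) : ∀ (b : List (List String)) (x y : Int) (t : String)
    (p q : Int), pvGetCell b p q = pvEmpty →
    pvGetCell (dfsF n b x y t).1 p q = pvEmpty := by
  induction n with
  | zero => intro b x y t p q h; exact h
  | succ n ih =>
    intro b x y t p q h
    by_cases hG : ¬ is_within_bounds b x y = true ∨ pvGetCell b x y ≠ t
    · rw [dfsF_succ_false _ _ _ _ _ hG]; exact h
    · rw [dfsF_succ_true _ _ _ _ _ hG]
      obtain ⟨⟨hy0, _, hx0, _⟩, _⟩ := guard_parts hG
      simp only
      have h0 : pvGetCell (pvSetCell b x y pvEmpty) p q = pvEmpty := by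
        rcases getCell_set b x y pvEmpty p q hx0 hy0 with h' | h'
        · rw [h']; exact h
        · exact h'
      exact ih _ _ _ _ _ _ (ih _ _ _ _ _ _ (ih _ _ _ _ _ _ (ih _ _ _ _ _ _ h0)))

lemma dfs_marks_empty (n : Nat) : ∀ (b : List (List String)) (x y : Int) (t : String)
    (p : Int × Int), p ∈ (dfsF n b x y t).2 →
    pvGetCell (dfsF n b x y t).1 p.1 p.2 = pvEmpty := by
  induction n with
  | zero => intro b x y t p hp; simp [dfsF] at hp
  | succ n ih =>
    intro b x y t p hp
    by_cases hG : ¬ is_within_bounds b x y = true ∨ pvGetCell b x y ≠ t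
    · rw [dfsF_succ_false _ _ _ _ _ hG] at hp; simp at hp
    · rw [dfsF_succ_true _ _ _ _ _ hG] at hp ⊢
      obtain ⟨⟨hy0, hyl, hx0, _⟩, _⟩ := guard_parts hG
      simp only [List.mem_cons, List.mem_append] at hp
      simp only
      rcases hp with hp | ((hp | hp) | hp) | hp
      · subst hp
        exact dfs_preserves_empty n _ _ _ _ _ _ (dfs_preserves_empty n _ _ _ _ _ _
          (dfs_preserves_empty n _ _ _ _ _ _ (dfs_preserves_empty n _ _ _ _ _ _
            (getCell_set_self b x y hx0 hy0 hyl))))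
      · exact dfs_preserves_empty n _ _ _ _ _ _ (dfs_preserves_empty n _ _ _ _ _ _
          (dfs_preserves_empty n _ _ _ _ _ _ (ih _ _ _ _ _ hp)))
      · exact dfs_preserves_empty n _ _ _ _ _ _ (dfs_preserves_empty n _ _ _ _ _ _
          (ih _ _ _ _ _ hp))
      · exact dfs_preserves_empty n _ _ _ _ _ _ (ih _ _ _ _ _ hp)
      · exact ih _ _ _ _ _ hp

lemma dfs_fuel (k : Nat) : ∀ (b : List (List String)) (n m : Nat) (x y : Int) (t : String),
    t ≠ pvEmpty → pvCount b t ≤ k → pvCount b t < n → pvCount b t < m →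
    dfsF n b x y t = dfsF m b x y t := by
  induction k using Nat.strong_induction_on with
  | _ k ih =>
  intro b n m x y t ht hk hn hm
  match n, m with
  | n + 1, m + 1 =>
  by_cases hG : ¬ is_within_bounds b x y = true ∨ pvGetCell b x y ≠ t
  · rw [dfsF_succ_false _ _ _ _ _ hG, dfsF_succ_false _ _ _ _ _ hG]
  · rw [dfsF_succ_true _ _ _ _ _ hG, dfsF_succ_true _ _ _ _ _ hG]
    obtain ⟨⟨hy0, hyl, hx0, _⟩, hc⟩ := guard_parts hG
    have hlt : pvCount (pvSetCell b x y pvEmpty) t < pvCount b t :=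
      pvCount_setCell_lt b x y t hx0 hy0 hyl hc ht
    set b0 := pvSetCell b x y pvEmpty with hb0
    have e1 : dfsF n b0 (x + 1) y t = dfsF m b0 (x + 1) y t :=
      ih (pvCount b0 t) (by omega) b0 n m (x + 1) y t ht le_rfl (by omega) (by omega)
    rw [e1]
    have c1 : pvCount (dfsF m b0 (x + 1) y t).1 t ≤ pvCount b0 t :=
      dfs_count_le m b0 (x + 1) y t ht
    set B1 := (dfsF m b0 (x + 1) y t).1 with hB1
    have e2 : dfsF n B1 (x - 1) y t = dfsF m B1 (x - 1) y t :=
      ih (pvCount B1 t) (by omega) B1 n m (x - 1) y t ht le_rfl (by omega) (by omega)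
    rw [e2]
    have c2 : pvCount (dfsF m B1 (x - 1) y t).1 t ≤ pvCount B1 t :=
      dfs_count_le m B1 (x - 1) y t ht
    set B2 := (dfsF m B1 (x - 1) y t).1 with hB2
    have e3 : dfsF n B2 x (y + 1) t = dfsF m B2 x (y + 1) t :=
      ih (pvCount B2 t) (by omega) B2 n m x (y + 1) t ht le_rfl (by omega) (by omega)
    rw [e3]
    have c3 : pvCount (dfsF m B2 x (y + 1) t).1 t ≤ pvCount B2 t :=
      dfs_count_le m B2 x (y + 1) t ht
    set B3 := (dfsF m B2 x (y + 1) t).1 with hB3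
    have e4 : dfsF n B3 x (y - 1) t = dfsF m B3 x (y - 1) t :=
      ih (pvCount B3 t) (by omega) B3 n m x (y - 1) t ht le_rfl (by omega) (by omega)
    rw [e4]

def dfsBig (b : List (List String)) (x y : Int) (t : String) :
    List (List String) × List (Int × Int) :=
  dfsF (pvCount b t + 1) b x y t

lemma dfs_eq_big (n : Nat) (b : List (List String)) (x y : Int) (t : String)
    (ht : t ≠ pvEmpty) (hn : pvCount b t < n) : dfsF n b x y t = dfsBig b x y t :=
  dfs_fuel (pvCount b t) b n (pvCount b t + 1) x y t ht le_rfl hn (Nat.lt_succ_self _)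

def stackBig (b : List (List String)) (s : List (Int × Int)) (t : String) :
    List (List String) :=
  stackFillF (4 * pvCount b t + s.length + 1) b s t

lemma stack_fuel (μ : Nat) : ∀ (b : List (List String)) (s : List (Int × Int))
    (m m' : Nat) (t : String), t ≠ pvEmpty →
    4 * pvCount b t + s.length ≤ μ →
    4 * pvCount b t + s.length < m → 4 * pvCount b t + s.length < m' →
    stackFillF m b s t = stackFillF m' b s t := by
  induction μ using Nat.strong_induction_on with
  | _ μ ih =>
  intro b s m m' t ht hμ hm hm'
  match m, m' with
  | m + 1, m' + 1 =>
  match s with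
  | [] => rw [stackF_nil, stackF_nil]
  | (x, y) :: s' =>
    simp only [List.length_cons] at hμ hm hm'
    by_cases hG : ¬ is_within_bounds b x y = true ∨ pvGetCell b x y ≠ t
    · rw [stackF_cons_true _ _ _ _ _ _ hG, stackF_cons_true _ _ _ _ _ _ hG]
      exact ih (4 * pvCount b t + s'.length) (by omega) b s' m m' t ht le_rfl
        (by omega) (by omega)
    · rw [stackF_cons_false _ _ _ _ _ _ hG, stackF_cons_false _ _ _ _ _ _ hG]
      obtain ⟨⟨hy0, hyl, hx0, _⟩, hc⟩ := guard_parts hG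
      have hlt : pvCount (pvSetCell b x y pvEmpty) t < pvCount b t :=
        pvCount_setCell_lt b x y t hx0 hy0 hyl hc ht
      refine ih (4 * pvCount (pvSetCell b x y pvEmpty) t + (s'.length + 4)) (by omega)
        _ _ m m' t ht (by simp only [List.length_cons]; omega)
        (by simp only [List.length_cons]; omega) (by simp only [List.length_cons]; omega)

lemma stack_eq_big (m : Nat) (b : List (List String)) (s : List (Int × Int)) (t : String)
    (ht : t ≠ pvEmpty) (hm : 4 * pvCount b t + s.length < m) :
    stackFillF m b s t = stackBig b s t :=
  stack_fuel (4 * pvCount b t + s.length) b s m _ t ht le_rfl hm (Nat.lt_succ_self _)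

-- the central simulation: one stack pop-and-expand cycle runs exactly A's dfs
lemma stack_dfs (k : Nat) : ∀ (b : List (List String)) (x y : Int)
    (s : List (Int × Int)) (t : String), t ≠ pvEmpty → pvCount b t ≤ k →
    stackBig b ((x, y) :: s) t = stackBig (dfsBig b x y t).1 s t := by
  induction k using Nat.strong_induction_on with
  | _ k ih =>
  intro b x y s t ht hk
  unfold stackBig dfsBig
  simp only [List.length_cons]
  by_cases hG : ¬ is_within_bounds b x y = true ∨ pvGetCell b x y ≠ t
  · rw [stackF_cons_true _ _ _ _ _ _ hG, dfsF_succ_false _ _ _ _ _ hG]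
    dsimp only
    exact stack_fuel _ b s _ _ t ht le_rfl (by omega) (by omega)
  · rw [stackF_cons_false _ _ _ _ _ _ hG, dfsF_succ_true _ _ _ _ _ hG]
    obtain ⟨⟨hy0, hyl, hx0, _⟩, hc⟩ := guard_parts hG
    have hlt : pvCount (pvSetCell b x y pvEmpty) t < pvCount b t :=
      pvCount_setCell_lt b x y t hx0 hy0 hyl hc ht
    set b0 := pvSetCell b x y pvEmpty with hb0
    simp only
    -- rewrite the four inner dfs calls to their canonical-fuel forms
    have e1 : dfsF (pvCount b t) b0 (x + 1) y t = dfsBig b0 (x + 1) y t :=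
      dfs_eq_big _ _ _ _ _ ht (by omega)
    rw [e1]
    have c1 : pvCount (dfsBig b0 (x + 1) y t).1 t ≤ pvCount b0 t :=
      dfs_count_le _ _ _ _ _ ht
    set B1 := (dfsBig b0 (x + 1) y t).1 with hB1
    have e2 : dfsF (pvCount b t) B1 (x - 1) y t = dfsBig B1 (x - 1) y t :=
      dfs_eq_big _ _ _ _ _ ht (by omega)
    rw [e2]
    have c2 : pvCount (dfsBig B1 (x - 1) y t).1 t ≤ pvCount B1 t :=
      dfs_count_le _ _ _ _ _ ht
    set B2 := (dfsBig B1 (x - 1) y t).1 with hB2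
    have e3 : dfsF (pvCount b t) B2 x (y + 1) t = dfsBig B2 x (y + 1) t :=
      dfs_eq_big _ _ _ _ _ ht (by omega)
    rw [e3]
    have c3 : pvCount (dfsBig B2 x (y + 1) t).1 t ≤ pvCount B2 t :=
      dfs_count_le _ _ _ _ _ ht
    set B3 := (dfsBig B2 x (y + 1) t).1 with hB3
    have e4 : dfsF (pvCount b t) B3 x (y - 1) t = dfsBig B3 x (y - 1) t :=
      dfs_eq_big _ _ _ _ _ ht (by omega)
    rw [e4]
    set B4 := (dfsBig B3 x (y - 1) t).1 with hB4
    have c4 : pvCount B4 t ≤ pvCount B3 t := dfs_count_le _ _ _ _ _ ht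
    -- left side: four simulation steps via the strong induction hypothesis
    have l1 : stackFillF (4 * pvCount b t + (s.length + 1)) b0
        ((x + 1, y) :: (x - 1, y) :: (x, y + 1) :: (x, y - 1) :: s) t =
        stackBig b0 ((x + 1, y) :: (x - 1, y) :: (x, y + 1) :: (x, y - 1) :: s) t :=
      stack_eq_big _ _ _ _ ht (by simp only [List.length_cons]; omega)
    rw [l1]
    rw [ih (pvCount b0 t) (by omega) b0 (x + 1) y _ t ht le_rfl]
    rw [ih (pvCount B1 t) (by omega) B1 (x - 1) y _ t ht le_rfl]
    rw [ih (pvCount B2 t) (by omega) B2 x (y + 1) _ t ht le_rfl]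
    rw [ih (pvCount B3 t) (by omega) B3 x (y - 1) _ t ht le_rfl]
    rfl

-- outer-scan invariant between A's state and B's state
def pvInv (board : List (List String))
    (stA : List (Int × Int) × PySem.Set (Int × Int) × List (List String))
    (stB : List (Int × Int) × List (List String)) : Prop :=
  stA.1 = stB.1 ∧ stA.2.2 = stB.2 ∧
  (∀ p ∈ stA.2.1, pvGetCell stA.2.2 p.1 p.2 = pvEmpty) ∧
  pvShape stA.2.2 = pvShape board

lemma shape_len {b b' : List (List String)} (h : pvShape b' = pvShape b) :
    b'.length = b.length ∧ (b'.headD []).length = (b.headD []).length := by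
  constructor
  · have := congrArg List.length h; simpa [pvShape] using this
  · cases b' <;> cases b <;> simp_all [pvShape]

lemma cell_sim (board : List (List String))
    (stA : List (Int × Int) × PySem.Set (Int × Int) × List (List String))
    (stB : List (Int × Int) × List (List String)) (x y : Int)
    (hx0 : 0 ≤ x) (hxw : x < ((board.headD []).length : Int))
    (hy0 : 0 ≤ y) (hyh : y < (board.length : Int))
    (h : pvInv board stA stB) :
    pvInv board (pvCellA stA x y) (pvCellB stB x y) := by
  obtain ⟨blobs, visited, b⟩ := stA
  obtain ⟨blobsB, bB⟩ := stB
  obtain ⟨h1, h2, h3, h4⟩ := h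
  simp only at h1 h2 h3 h4
  subst h1
  subst h2
  unfold pvCellA pvCellB
  simp only
  by_cases hce : pvGetCell b x y = pvEmpty
  · rw [if_pos (Or.inr hce), if_pos hce]
    exact ⟨rfl, rfl, h3, h4⟩
  · have hvis : (x, y) ∉ visited := fun hv => hce (h3 (x, y) hv)
    rw [if_neg (not_or.mpr ⟨hvis, hce⟩), if_neg hce]
    obtain ⟨hlen, hhead⟩ := shape_len h4
    have hbnds : is_within_bounds b x y = true := by
      rw [bounds_iff]
      refine ⟨hy0, by rw [hlen]; exact hyh, hx0, by rw [hhead]; exact hxw⟩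
    have hG : ¬ (¬ is_within_bounds b x y = true ∨ pvGetCell b x y ≠ pvGetCell b x y) := by
      rw [not_or]
      exact ⟨by simp [hbnds], by simp⟩
    have hflat : pvCount b (pvGetCell b x y) ≤ b.flatten.length := pvCount_le_flatten _ _
    have hgcb : get_connected_blocks b x y = dfsBig b x y (pvGetCell b x y) := by
      unfold get_connected_blocks
      exact dfs_eq_big _ _ _ _ _ hce (by omega)
    have hstack : stackFillF (4 * b.flatten.length + 2) b [(x, y)] (pvGetCell b x y) =
        (dfsBig b x y (pvGetCell b x y)).1 := by
      rw [stack_eq_big _ _ _ _ hce (by simp only [List.length_cons, List.length_nil]; omega)]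
      rw [stack_dfs (pvCount b (pvGetCell b x y)) b x y [] (pvGetCell b x y) hce le_rfl]
      rfl
    have hhd : (dfsBig b x y (pvGetCell b x y)).2.headD (0, 0) = (x, y) := by
      unfold dfsBig
      rw [dfsF_succ_true _ _ _ _ _ hG]
      rfl
    rw [hgcb, hstack, hhd]
    refine ⟨rfl, rfl, ?_, ?_⟩
    · intro p hp
      simp only [PySem.Set.mem_update] at hp
      rcases hp with hp | hp
      · exact dfs_preserves_empty _ _ _ _ _ _ _ (h3 p hp)
      · exact dfs_marks_empty _ _ _ _ _ _ hp
    · exact (dfs_shape _ _ _ _ _).trans h4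

lemma inner_sim (board : List (List String)) (xs : List Int) (y : Int)
    (hy0 : 0 ≤ y) (hyh : y < (board.length : Int))
    (hxs : ∀ x ∈ xs, 0 ≤ x ∧ x < ((board.headD []).length : Int)) :
    ∀ stA stB, pvInv board stA stB →
      pvInv board (xs.foldl (fun st x => pvCellA st x y) stA)
        (xs.foldl (fun st x => pvCellB st x y) stB) := by
  induction xs with
  | nil => intro stA stB h; exact h
  | cons x xs ih =>
    intro stA stB h
    have hx := hxs x (by simp)
    exact ih (fun z hz => hxs z (by simp [hz]))
      _ _ (cell_sim board stA stB x y hx.1 hx.2 hy0 hyh h)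

lemma outer_sim (board : List (List String)) (ys : List Int)
    (hys : ∀ y ∈ ys, 0 ≤ y ∧ y < (board.length : Int)) :
    ∀ stA stB, pvInv board stA stB →
      pvInv board
        (ys.foldl (fun st y =>
          (PySem.List.pyRange 0 (((board.headD []).length : Int))).foldl
            (fun st x => pvCellA st x y) st) stA)
        (ys.foldl (fun st y =>
          (PySem.List.pyRange 0 (((board.headD []).length : Int))).foldl
            (fun st x => pvCellB st x y) st) stB) := by
  induction ys with
  | nil => intro stA stB h; exact h
  | cons y ys ih =>
    intro stA stB h
    have hy := hys y (by simp)
    refine ih (fun z hz => hys z (by simp [hz])) _ _ ?_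
    exact inner_sim board _ y hy.1 hy.2
      (fun x hx => (PySem.List.mem_pyRange_one.mp hx)) stA stB h

-- ===== VERDICT (by name: the statement is the Claim_ definition above) =====
theorem get_blobs_spec : Claim_equal_get_blobs := by
  intro board _ _
  unfold Spec_get_blobs get_blobs get_blobs_alt
  have hcopy : board.map (fun row => PySem.List.slice row none none) = board := by
    simp [pysem]
  rw [hcopy]
  have h := outer_sim board (PySem.List.pyRange 0 (board.length : Int))
    (fun y hy => PySem.List.mem_pyRange_one.mp hy)
    ([], PySem.Set.empty, board) ([], board)
    ⟨rfl, rfl, by simp [PySem.Set.empty], rfl⟩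
  exact h.1
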